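-- pv_equiv track=rewrite | github.com/mohammedterryjack/young_pythoneers | phase_1_turtles/lesson_5/maze_utils.py | convert_maze_to_coordinates
-- ===== SOURCE A (Python) =====
-- from typing import Tuple, Iterator, Set
--
-- def convert_maze_to_coordinates(maze:str, wall:str="X", scale:int=30) -> Iterator[Tuple[int,int]]:
--     rows = maze.split("\n")
--     for row_index,row in enumerate(rows):
--         for column_index,cell in enumerate(row):
--             if cell == wall:
--                 yield (
--                     column_index*scale,
--                     -row_index*scale
--                 )
-- ===== SOURCE B (Python) =====
-- def convert_maze_to_coordinates(maze: str, wall: str = "X", scale: int = 30):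
--     row_index = 0
--     column_index = 0
--     for ch in maze:
--         if ch == "\n":
--             row_index += 1
--             column_index = 0
--             continue
--         if ch == wall:
--             yield (column_index * scale, -row_index * scale)
--         column_index += 1
-- ===== Notes on version B (the rewrite author's own statement) =====
-- stated objective: alternative
-- what changed: Replaced the split-into-rows plus nested enumerate loops with a single linear scan over the raw string that maintains explicit row/column counters, resetting them at each newline.
import Mathlib
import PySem

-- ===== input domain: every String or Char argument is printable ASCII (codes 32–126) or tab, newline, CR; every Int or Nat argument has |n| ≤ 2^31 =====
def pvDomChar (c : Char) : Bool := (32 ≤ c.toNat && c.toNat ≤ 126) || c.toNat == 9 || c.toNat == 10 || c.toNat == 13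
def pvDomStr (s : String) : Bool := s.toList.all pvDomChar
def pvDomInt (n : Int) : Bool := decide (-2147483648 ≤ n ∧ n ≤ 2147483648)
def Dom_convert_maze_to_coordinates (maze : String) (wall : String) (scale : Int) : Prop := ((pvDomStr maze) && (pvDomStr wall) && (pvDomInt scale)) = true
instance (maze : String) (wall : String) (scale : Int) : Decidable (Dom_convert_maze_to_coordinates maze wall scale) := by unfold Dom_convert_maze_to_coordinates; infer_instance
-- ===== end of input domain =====

-- B replaces A's split("\n") + nested enumerate loops by a single linear scan with explicit row/column counters (alternative decomposition, same cost).


-- ===== PORT A =====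
-- maze.split("\n") on code points (PySem.Chars.splitOn is exact str.split with a non-empty sep);
-- a cell of a row is one char c, and Python's `cell == wall` is `[c] = wall.toList`.
def convert_maze_to_coordinates (maze : String) (wall : String) (scale : Int) : List (Int × Int) :=
  let rows := PySem.Chars.splitOn maze.toList ['\n']
  (PySem.List.enumerate rows 0).foldl (fun acc rr =>
    (PySem.List.enumerate rr.2 0).foldl (fun acc2 cc =>
      if [cc.2] = wall.toList then acc2 ++ [(cc.1 * scale, -rr.1 * scale)] else acc2) acc) []

-- ===== PORT B =====
-- single scan over the raw characters with row/column counters (Source B's loop, the generator collected in order)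
def pvScanB (wallL : List Char) (scale : Int) : List Char → Int → Int → List (Int × Int)
  | [], _, _ => []
  | c :: rest, r, col =>
    if c = '\n' then pvScanB wallL scale rest (r + 1) 0
    else if [c] = wallL then (col * scale, -r * scale) :: pvScanB wallL scale rest r (col + 1)
    else pvScanB wallL scale rest r (col + 1)

def convert_maze_to_coordinates_alt (maze : String) (wall : String) (scale : Int) : List (Int × Int) :=
  pvScanB wall.toList scale maze.toList 0 0

-- ===== PRECONDITION & SPEC =====
def Spec_convert_maze_to_coordinates (maze : String) (wall : String) (scale : Int) (out : List (Int × Int)) : Prop := out = convert_maze_to_coordinates_alt maze wall scale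
instance (maze : String) (wall : String) (scale : Int) (out : List (Int × Int)) : Decidable (Spec_convert_maze_to_coordinates maze wall scale out) := by unfold Spec_convert_maze_to_coordinates; infer_instance

-- ===== CLAIM (what is proved, stated in full; the proofs are below) =====
def Claim_equal_convert_maze_to_coordinates : Prop := ∀ (maze : String) (wall : String) (scale : Int), Dom_convert_maze_to_coordinates maze wall scale → Spec_convert_maze_to_coordinates maze wall scale (convert_maze_to_coordinates maze wall scale)

-- ===== LEMMAS AND PROOFS =====

-- a direct recursive description of str.split("\n")
def pvSplitNL : List Char → List Char → List (List Char)
  | [], cur => [cur.reverse]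
  | c :: rest, cur => if c = '\n' then cur.reverse :: pvSplitNL rest [] else pvSplitNL rest (c :: cur)

-- coordinates contributed by one row, starting at column col
def pvRowC (wallL : List Char) (scale : Int) : List Char → Int → Int → List (Int × Int)
  | [], _, _ => []
  | c :: cs, r, col =>
    (if [c] = wallL then [(col * scale, -r * scale)] else []) ++ pvRowC wallL scale cs r (col + 1)

-- coordinates contributed by a list of rows starting at row index r
def pvRows (wallL : List Char) (scale : Int) : List (List Char) → Int → List (Int × Int)
  | [], _ => []
  | row :: rest, r => pvRowC wallL scale row r 0 ++ pvRows wallL scale rest (r + 1)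

theorem pvSplit_go (fuel : Nat) :
    ∀ (l cur : List Char) (acc : List (List Char)), l.length ≤ fuel →
      PySem.Chars.splitOn.go ['\n'] fuel l cur acc = acc.reverse ++ pvSplitNL l cur := by
  induction fuel with
  | zero =>
    intro l cur acc h
    have : l = [] := List.eq_nil_of_length_eq_zero (Nat.le_zero.mp h)
    subst this
    simp [PySem.Chars.splitOn.go, pvSplitNL]
  | succ n ih =>
    intro l cur acc h
    cases l with
    | nil => simp [PySem.Chars.splitOn.go, pvSplitNL]
    | cons c rest =>
      by_cases hc : c = ('\n' : Char)
      · subst hc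
        rw [PySem.Chars.splitOn.go]
        simp only [List.isPrefixOf, Bool.and_true, beq_self_eq_true,
          if_pos, List.length_cons, List.length_nil, List.drop_succ_cons, List.drop_zero]
        rw [ih rest [] (cur.reverse :: acc) (by simpa using Nat.le_of_succ_le_succ h)]
        simp [pvSplitNL]
      · rw [PySem.Chars.splitOn.go]
        have hpre : [('\n' : Char)].isPrefixOf (c :: rest) = false := by
          simp [List.isPrefixOf]
          exact fun hh => absurd hh.symm hc
        rw [hpre]
        simp only [Bool.false_eq_true, if_false]
        rw [ih rest (c :: cur) acc (by simpa using Nat.le_of_succ_le_succ h)]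
        simp [pvSplitNL, hc]

theorem pvSplit_eq (l : List Char) :
    PySem.Chars.splitOn l ['\n'] = pvSplitNL l [] := by
  unfold PySem.Chars.splitOn
  rw [pvSplit_go (l.length + 1) l [] [] (Nat.le_succ _)]
  simp

theorem pvRowC_eq_filter (wallL : List Char) (scale : Int) (r : Int) :
    ∀ (row : List Char) (col : Int),
      ((PySem.List.enumerate row col).filter (fun cc => decide ([cc.2] = wallL))).map
        (fun cc => (cc.1 * scale, -r * scale)) = pvRowC wallL scale row r col := by
  intro row
  induction row with
  | nil => intro col; simp [PySem.List.enumerate_nil, pvRowC]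
  | cons c cs ih =>
    intro col
    rw [PySem.List.enumerate_cons]
    have hih := ih (col + 1)
    simp only [neg_mul] at hih
    by_cases hc : [c] = wallL
    · simp [hc, pvRowC, hih]
    · simp [hc, pvRowC, hih]

theorem pvOuter_eq (wallL : List Char) (wall : String) (scale : Int)
    (hw : wall.toList = wallL) :
    ∀ (rows : List (List Char)) (s : Int) (acc : List (Int × Int)),
      (PySem.List.enumerate rows s).foldl (fun acc rr =>
        (PySem.List.enumerate rr.2 0).foldl (fun acc2 cc =>
          if [cc.2] = wall.toList then acc2 ++ [(cc.1 * scale, -rr.1 * scale)] else acc2) acc) acc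
      = acc ++ pvRows wallL scale rows s := by
  intro rows
  induction rows with
  | nil => intro s acc; simp [PySem.List.enumerate_nil, pvRows]
  | cons row rest ih =>
    intro s acc
    rw [PySem.List.enumerate_cons, List.foldl_cons, ih (s + 1)]
    have hin : (PySem.List.enumerate row 0).foldl (fun acc2 cc =>
        if [cc.2] = wall.toList then acc2 ++ [(cc.1 * scale, -s * scale)] else acc2) acc
        = acc ++ pvRowC wallL scale row s 0 := by
      have := PySem.List.foldl_append_if (fun cc : Int × Char => decide ([cc.2] = wall.toList))
        (fun cc => (cc.1 * scale, -s * scale)) (PySem.List.enumerate row 0) acc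
      simp only [decide_eq_true_eq] at this
      rw [this, hw, pvRowC_eq_filter wallL scale s row 0]
    rw [hin, pvRows, List.append_assoc]

theorem pvRowC_append (wallL : List Char) (scale : Int) (r : Int) :
    ∀ (xs ys : List Char) (col : Int),
      pvRowC wallL scale (xs ++ ys) r col
        = pvRowC wallL scale xs r col ++ pvRowC wallL scale ys r (col + xs.length) := by
  intro xs
  induction xs with
  | nil => intro ys col; simp [pvRowC]
  | cons c cs ih =>
    intro ys col
    simp only [List.cons_append, pvRowC, ih ys (col + 1), List.append_assoc, List.length_cons]
    push_cast
    have h2 : col + 1 + (cs.length : Int) = col + ((cs.length : Int) + 1) := by ring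
    rw [h2]

theorem pvScanB_eq (wallL : List Char) (scale : Int) :
    ∀ (l cur : List Char) (r : Int),
      pvRowC wallL scale cur.reverse r 0 ++ pvScanB wallL scale l r (cur.length : Int)
        = pvRows wallL scale (pvSplitNL l cur) r := by
  intro l
  induction l with
  | nil => intro cur r; simp [pvScanB, pvSplitNL, pvRows]
  | cons c rest ih =>
    intro cur r
    by_cases hc : c = ('\n' : Char)
    · subst hc
      have := ih [] (r + 1)
      simp only [List.reverse_nil, pvRowC, List.length_nil, Nat.cast_zero, List.nil_append] at this
      simp [pvScanB, pvSplitNL, pvRows, this]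
    · have key := ih (c :: cur) r
      simp only [List.reverse_cons, List.length_cons] at key
      rw [pvRowC_append wallL scale r cur.reverse [c] 0] at key
      simp only [zero_add, List.length_reverse] at key
      rw [pvSplitNL, if_neg hc, ← key]
      rw [pvScanB, if_neg hc]
      by_cases hw : [c] = wallL
      · simp [pvRowC, hw]
      · simp [pvRowC, hw]

-- ===== VERDICT (by name: the statement is the Claim_ definition above) =====
theorem convert_maze_to_coordinates_spec : Claim_equal_convert_maze_to_coordinates := by
  intro maze wall scale _
  unfold Spec_convert_maze_to_coordinates convert_maze_to_coordinates convert_maze_to_coordinates_alt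
  rw [pvSplit_eq, pvOuter_eq wall.toList wall scale rfl (pvSplitNL maze.toList []) 0 []]
  have := pvScanB_eq wall.toList scale maze.toList [] 0
  simp only [List.reverse_nil, pvRowC, List.length_nil, Nat.cast_zero, List.nil_append] at this
  simp [← this]
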